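-- pv_equiv track=rewrite | github.com/fantauzzi/bioalg | chapter02/hidden_motif.py | number_to_kmer
-- ===== SOURCE A (Python) =====
-- def nucleotide_numbering():
--     """
--     Establish a mapping between the four DNA nucleotides and numbers.
--     :return: a pair of dictionaries, the first one mapping nucleotides (strings) to numbers, the second mapping numbers to nucleotides.
--     """
--     nucleotide_to_number = {'A': 0, 'C': 1, 'G': 2, 'T': 3}
--     number_to_nucleotide = {0: 'A', 1: 'C', 2: 'G', 3: 'T'}
--     return nucleotide_to_number, number_to_nucleotide
--
-- def number_to_kmer(n, k):
--     """
--     Convert a number into a k-mer, such that the conversion and its inversion make a bijection. The inversion of the conversion in implemented by kmer_to_number().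
--     :param n: The integer number to be converted.
--     :param k: The length of the desired k-mer.
--     :return: A k-mer.
--     """
--     assert k >= 1
--     _, number_to_nucleotide = nucleotide_numbering()
--     if k == 1:
--         return number_to_nucleotide[n]
--     prefix_number = n // 4
--     r = n % 4
--     nucleotide = number_to_nucleotide[r]
--     prefix_dna = number_to_kmer(prefix_number, k - 1)
--     res = prefix_dna + nucleotide
--     return res
-- ===== SOURCE B (Python) =====
-- def number_to_kmer(n, k):
--     assert k >= 1
--     number_to_nucleotide = {0: 'A', 1: 'C', 2: 'G', 3: 'T'}
--     res = ''
--     for _ in range(k - 1):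
--         res = number_to_nucleotide[n % 4] + res
--         n //= 4
--     return number_to_nucleotide[n] + res
-- ===== Notes on version B (the rewrite author's own statement) =====
-- stated objective: idiomatic
-- what changed: Replaced the k-deep recursion building the string front-to-back via recursive calls with a single iterative loop that prepends one digit per iteration and divides the number in place, keeping the raw leftover quotient for the final (most significant) lookup.
import Mathlib
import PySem

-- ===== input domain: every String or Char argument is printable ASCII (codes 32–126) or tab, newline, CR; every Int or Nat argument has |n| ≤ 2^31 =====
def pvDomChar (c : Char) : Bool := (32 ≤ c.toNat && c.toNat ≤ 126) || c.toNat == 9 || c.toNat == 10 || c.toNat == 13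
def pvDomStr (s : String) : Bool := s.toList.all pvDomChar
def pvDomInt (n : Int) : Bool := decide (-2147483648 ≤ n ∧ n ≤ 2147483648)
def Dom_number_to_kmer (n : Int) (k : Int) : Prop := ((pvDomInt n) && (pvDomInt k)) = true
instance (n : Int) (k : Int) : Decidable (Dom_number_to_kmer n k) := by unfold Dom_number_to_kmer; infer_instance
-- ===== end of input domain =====

-- B replaces A's k-deep recursion by a single iterative loop that prepends one digit per
-- step and divides n in place (idiomatic; same cost). Return-value equivalence only.

-- ===== PORT A =====
-- number_to_nucleotide from nucleotide_numbering(); lookup d[n] raises KeyError for keys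
-- outside {0,1,2,3} — those inputs are excluded by Pre_, the port returns "" there.
def pvNtnA (m : Int) : String :=
  PySem.Dict.getD (PySem.Dict.ofList [((0:Int), "A"), (1, "C"), (2, "G"), (3, "T")]) m ""

def number_to_kmer (n : Int) (k : Int) : String :=
  if k ≤ 0 then ""            -- 'assert k >= 1' fails (AssertionError); outside Pre_
  else if k = 1 then pvNtnA n
  else
    let prefix_number := PySem.Int.floordiv n 4
    let r := PySem.Int.mod n 4
    let nucleotide := pvNtnA r
    let prefix_dna := number_to_kmer prefix_number (k - 1)
    prefix_dna ++ nucleotide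
termination_by k.toNat
decreasing_by omega

-- ===== PORT B =====
def pvNtnB (m : Int) : String :=
  PySem.Dict.getD (PySem.Dict.ofList [((0:Int), "A"), (1, "C"), (2, "G"), (3, "T")]) m ""

-- the for-loop of Source B: 'steps' iterations of (res := ntn[n % 4] + res; n //= 4)
def pvLoopB : Int → Nat → String → Int × String
  | n, 0, res => (n, res)
  | n, s + 1, res => pvLoopB (PySem.Int.floordiv n 4) s (pvNtnB (PySem.Int.mod n 4) ++ res)

def number_to_kmer_alt (n : Int) (k : Int) : String :=
  if k ≤ 0 then ""            -- 'assert k >= 1' fails; outside Pre_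
  else
    let (m, res) := pvLoopB n (k - 1).toNat ""
    pvNtnB m ++ res

-- ===== PRECONDITION & SPEC =====
-- Pre_ excludes k < 1 (A's assert raises) and n outside [0, 4^k) (the final dictionary
-- lookup of the leftover quotient raises KeyError in A): exactly where A raises.
def Pre_number_to_kmer (n : Int) (k : Int) : Prop :=
  1 ≤ k ∧ 0 ≤ n ∧ n < (4 : Int) ^ k.toNat
instance (n : Int) (k : Int) : Decidable (Pre_number_to_kmer n k) := by
  unfold Pre_number_to_kmer; infer_instance

def pvWitness_number_to_kmer : Int × Int := (11, 3)

def Spec_number_to_kmer (n : Int) (k : Int) (out : String) : Prop := out = number_to_kmer_alt n k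
instance (n : Int) (k : Int) (out : String) : Decidable (Spec_number_to_kmer n k out) := by unfold Spec_number_to_kmer; infer_instance

-- ===== CLAIM (what is proved, stated in full; the proofs are below) =====
def Claim_equal_number_to_kmer : Prop := ∀ (n : Int) (k : Int), Dom_number_to_kmer n k → Pre_number_to_kmer n k → Spec_number_to_kmer n k (number_to_kmer n k)

-- ===== LEMMAS AND PROOFS =====

theorem pvNtn_eq : pvNtnA = pvNtnB := rfl

-- the loop accumulator factors out on the right
theorem pvLoopB_shift (s : Nat) : ∀ (n : Int) (res : String),
    pvLoopB n s res = ((pvLoopB n s "").1, (pvLoopB n s "").2 ++ res) := by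
  induction s with
  | zero =>
      intro n res
      simp [pvLoopB]
  | succ s ih =>
      intro n res
      simp only [pvLoopB]
      rw [ih _ (pvNtnB (PySem.Int.mod n 4) ++ res),
          ih _ (pvNtnB (PySem.Int.mod n 4) ++ "")]
      simp [String.append_assoc]

theorem pv_eq_on_pos : ∀ (j : Nat) (n : Int),
    number_to_kmer n (j + 1) = number_to_kmer_alt n (j + 1) := by
  intro j
  induction j with
  | zero =>
      intro n
      rw [number_to_kmer]
      simp [number_to_kmer_alt, pvLoopB, pvNtn_eq]
  | succ j ih =>
      intro n
      rw [number_to_kmer]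
      rw [if_neg (by push_cast; omega), if_neg (by push_cast; omega)]
      have hk : (((j + 1 : Nat) : Int)) + 1 - 1 = (j : Int) + 1 := by push_cast; ring
      rw [hk]
      simp only [ih]
      -- unfold both sides of B
      simp only [number_to_kmer_alt]
      rw [if_neg (by omega), if_neg (by omega)]
      have hnat2 : ((((j + 1 : Nat) : Int)) + 1 - 1).toNat = j + 1 := by omega
      have hnat1 : (((j : Int) + 1) - 1).toNat = j := by omega
      rw [hnat2, hnat1]
      simp only [pvLoopB]
      rw [pvLoopB_shift j (PySem.Int.floordiv n 4) (pvNtnB (PySem.Int.mod n 4) ++ "")]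
      simp [pvNtn_eq, String.append_assoc]

-- ===== VERDICT (by name: the statement is the Claim_ definition above) =====
theorem number_to_kmer_spec : Claim_equal_number_to_kmer := by
  intro n k _hDom hPre
  obtain ⟨hk, -, -⟩ := hPre
  unfold Spec_number_to_kmer
  have hj : k = ((k - 1).toNat : Int) + 1 := by omega
  rw [hj]
  exact pv_eq_on_pos (k - 1).toNat n
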